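-- pv_equiv track=rewrite | github.com/a1k0n/tt08-vgademo | extract.py | tohash
-- ===== SOURCE A (Python) =====
-- def tohash(row):
--     state = 0
--     out = []
--     for px in row:
--         if px == state:
--             out.append('7')
--         else:
--             out.append(str(px))
--             state = px
--     return ''.join(out)
-- ===== SOURCE B (Python) =====
-- def tohash(row):
--     # Run-length view: prepend the initial state 0, split into maximal runs of
--     # equal values, emit str(v) + '7'*(runlen-1) per run, then drop the leading
--     # character contributed by the prepended 0.
--     seq = [0] + list(row)
--     n = len(seq)
--     pieces = []
--     i = 0
--     while i < n:
--         j = i + 1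
--         while j < n and seq[j] == seq[i]:
--             j += 1
--         pieces.append(str(seq[i]) + '7' * (j - i - 1))
--         i = j
--     return ''.join(pieces)[1:]
-- ===== Notes on version B (the rewrite author's own statement) =====
-- stated objective: alternative
-- what changed: Replaces A's element-by-element state machine by run-length grouping: prepend the initial state 0, split into maximal runs of equal values with an index scanner, emit str(v)+'7'*(runlen-1) per run, and drop the leading character of the prepended 0.
import Mathlib
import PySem

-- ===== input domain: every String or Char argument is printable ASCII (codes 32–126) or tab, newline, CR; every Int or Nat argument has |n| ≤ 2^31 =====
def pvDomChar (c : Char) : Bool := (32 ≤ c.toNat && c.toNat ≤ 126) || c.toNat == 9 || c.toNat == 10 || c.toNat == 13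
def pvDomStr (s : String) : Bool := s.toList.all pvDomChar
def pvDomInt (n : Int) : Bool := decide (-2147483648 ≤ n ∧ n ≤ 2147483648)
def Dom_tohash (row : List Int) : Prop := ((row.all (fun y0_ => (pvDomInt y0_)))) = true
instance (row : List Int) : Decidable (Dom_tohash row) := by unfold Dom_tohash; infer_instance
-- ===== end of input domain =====

-- B re-derives the encoding by run-length grouping: split [0]+row into maximal
-- runs, emit str(v)+'7'*(len-1) per run, drop the leading char (objective: alternative).

-- ===== PORT A =====
-- literal port of A's loop: state starts at 0, out accumulates the appended strings
-- (kept as their code-point lists; ''.join(out) = flatten, exact)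
def tohash (row : List Int) : String :=
  String.ofList
    ((row.foldl
      (fun (acc : Int × List (List Char)) px =>
        if px == acc.1 then (acc.1, acc.2 ++ [['7']])
        else (px, acc.2 ++ [(PySem.Int.toStr px).toList]))
      (0, [])).2.flatten)

-- ===== PORT B =====
-- Source B's run scanner: the outer while starting at i takes the maximal run of
-- seq[i]'s value (inner while = takeWhile), then continues at j (= dropWhile)
def pvRuns : List Int → List (Int × Nat)
  | [] => []
  | x :: xs => (x, 1 + (xs.takeWhile (· == x)).length) :: pvRuns (xs.dropWhile (· == x))
  termination_by l => l.length
  decreasing_by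
    simpa using Nat.lt_succ_of_le (List.length_dropWhile_le _ _)

-- one piece: str(seq[i]) + '7' * (j - i - 1), as code points
def pvPiece (r : Int × Nat) : List Char :=
  (PySem.Int.toStr r.1).toList ++ List.replicate (r.2 - 1) '7'

-- ''.join(pieces)[1:] : join with '' = flatten of the code points; [1:] = drop 1 (exact)
def tohash_alt (row : List Int) : String :=
  String.ofList (((pvRuns (0 :: row)).map pvPiece).flatten.drop 1)

-- ===== PRECONDITION & SPEC =====
def Spec_tohash (row : List Int) (out : String) : Prop := out = tohash_alt row
instance (row : List Int) (out : String) : Decidable (Spec_tohash row out) := by unfold Spec_tohash; infer_instance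

-- ===== CLAIM (what is proved, stated in full; the proofs are below) =====
def Claim_equal_tohash : Prop := ∀ (row : List Int), Dom_tohash row → Spec_tohash row (tohash row)

-- ===== LEMMAS AND PROOFS =====

theorem pvRuns_nil : pvRuns [] = [] := by rw [pvRuns.eq_def]

-- the chars A emits for one (current, previous-state) pair
def pvEmit (cp : Int × Int) : List Char :=
  if cp.1 == cp.2 then ['7'] else (PySem.Int.toStr cp.1).toList

-- A's loop invariant: the out-list is the accumulated prefix plus the zip-map
-- of the row against its running state (state :: row)
theorem pvLoop_eq (row : List Int) : ∀ (s : Int) (out : List (List Char)),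
    (row.foldl
      (fun (acc : Int × List (List Char)) px =>
        if px == acc.1 then (acc.1, acc.2 ++ [['7']])
        else (px, acc.2 ++ [(PySem.Int.toStr px).toList]))
      (s, out)).2 = out ++ (row.zip (s :: row)).map pvEmit := by
  induction row with
  | nil => intro s out; simp
  | cons c rest ih =>
    intro s out
    by_cases h : c = s
    · subst h
      simp only [List.foldl_cons, List.zip_cons_cons, List.map_cons, beq_self_eq_true, if_pos]
      rw [ih c (out ++ [['7']])]
      simp [pvEmit]
    · have hb : (c == s) = false := by simp [h]
      simp only [List.foldl_cons, List.zip_cons_cons, List.map_cons, hb, Bool.false_eq_true,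
        if_false]
      rw [ih c (out ++ [(PySem.Int.toStr c).toList])]
      simp [pvEmit, hb]

-- B's run decomposition of s :: row flattens to str(s) followed by A's zip-map emission
theorem pvRuns_flatten (row : List Int) : ∀ (s : Int),
    ((pvRuns (s :: row)).map pvPiece).flatten
      = (PySem.Int.toStr s).toList ++ ((row.zip (s :: row)).map pvEmit).flatten := by
  induction row with
  | nil =>
    intro s
    rw [pvRuns]
    simp only [List.dropWhile_nil, List.takeWhile_nil, pvRuns_nil, List.length_nil,
      List.map_cons, List.map_nil, List.flatten_cons, List.flatten_nil, pvPiece]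
    simp
  | cons c rest ih =>
    intro s
    by_cases h : c = s
    · subst h
      have key := ih c
      rw [pvRuns] at key ⊢
      simp only [List.takeWhile_cons, beq_self_eq_true, if_pos, List.dropWhile_cons,
        List.length_cons, List.map_cons, List.flatten_cons, pvPiece] at key ⊢
      have hc : List.replicate (1 + (rest.takeWhile (· == c)).length - 1) '7'
          = List.replicate (rest.takeWhile (· == c)).length '7' := by
        congr 1; omega
      rw [hc, List.append_assoc] at key
      have key' := List.append_cancel_left key
      have hr : List.replicate (1 + ((rest.takeWhile (· == c)).length + 1) - 1) '7'
          = '7' :: List.replicate (rest.takeWhile (· == c)).length '7' := by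
        rw [show 1 + ((rest.takeWhile (· == c)).length + 1) - 1
            = (rest.takeWhile (· == c)).length + 1 by omega]
        simp [List.replicate_succ]
      rw [hr]
      simp only [List.zip_cons_cons, List.map_cons, List.flatten_cons, pvEmit,
        beq_self_eq_true, if_pos]
      simp only [List.append_assoc] at key' ⊢
      rw [← key']
      simp
    · have hb : (c == s) = false := by simp [h]
      rw [pvRuns]
      simp only [List.takeWhile_cons, hb, Bool.false_eq_true, if_false, List.dropWhile_cons,
        List.length_nil, List.map_cons, List.flatten_cons]
      rw [ih c]
      simp only [List.zip_cons_cons, List.map_cons, List.flatten_cons, pvEmit, hb,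
        Bool.false_eq_true, if_false, pvPiece]
      simp

-- ===== VERDICT (by name: the statement is the Claim_ definition above) =====
theorem tohash_spec : Claim_equal_tohash := by
  intro row _
  unfold Spec_tohash tohash tohash_alt
  rw [pvLoop_eq row 0 [], pvRuns_flatten row 0, List.nil_append]
  have h0 : (PySem.Int.toStr (0 : Int)).toList = ['0'] := by decide
  rw [h0]
  rfl
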